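-- pv_equiv track=rewrite | github.com/swhh/project_euler_problems | problem_96.py | possibles_fit
-- ===== SOURCE A (Python) =====
-- def possibles_fit(possible_one, possible_two, possible_three):
--     for i in range(3):
--         one = set(possible_one[i * 3: i + 3])
--         two = set(possible_two[i * 3: i + 3])
--         three = set(possible_three[i * 3: i + 3])
--         if one.intersection(two) or two.intersection(three) or three.intersection(one):
--             return False
--     return True
-- ===== SOURCE B (Python) =====
-- def possibles_fit(possible_one, possible_two, possible_three):
--     for i in range(3):
--         combined = []
--         for grp in (possible_one, possible_two, possible_three):
--             combined += list(dict.fromkeys(grp[i * 3: i + 3]))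
--         if len(set(combined)) != len(combined):
--             return False
--     return True
-- ===== Notes on version B (the rewrite author's own statement) =====
-- stated objective: alternative
-- what changed: Each round's three pairwise set intersections are replaced by a single duplicate test on the concatenation of the three deduplicated slices (len(set(combined)) != len(combined)).
import Mathlib
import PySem

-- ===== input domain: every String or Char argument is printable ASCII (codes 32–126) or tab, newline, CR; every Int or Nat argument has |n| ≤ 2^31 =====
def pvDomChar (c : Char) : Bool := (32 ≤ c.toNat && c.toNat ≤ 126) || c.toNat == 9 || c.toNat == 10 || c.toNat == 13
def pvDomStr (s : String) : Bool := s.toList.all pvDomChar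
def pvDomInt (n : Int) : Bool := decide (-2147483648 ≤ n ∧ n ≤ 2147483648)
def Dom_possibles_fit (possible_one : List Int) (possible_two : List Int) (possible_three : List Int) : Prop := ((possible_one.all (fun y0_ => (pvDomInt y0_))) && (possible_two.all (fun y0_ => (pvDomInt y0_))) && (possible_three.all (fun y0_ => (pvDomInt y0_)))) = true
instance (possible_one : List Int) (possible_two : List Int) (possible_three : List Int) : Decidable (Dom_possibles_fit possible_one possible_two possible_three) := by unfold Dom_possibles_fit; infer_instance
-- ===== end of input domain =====

-- B replaces A's three pairwise set intersections per round by one duplicate test on the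
-- concatenation of the three (deduplicated) candidate slices (objective: alternative, same cost).

-- ===== PORT A =====
-- loop body of 'for i in range(3)' with early return False
def possiblesFitLoopA (possible_one : List Int) (possible_two : List Int) (possible_three : List Int) : List Int → Bool
  | [] => true
  | i :: rest =>
    let one := PySem.Set.ofList (PySem.List.slice possible_one (some (i * 3)) (some (i + 3)))
    let two := PySem.Set.ofList (PySem.List.slice possible_two (some (i * 3)) (some (i + 3)))
    let three := PySem.Set.ofList (PySem.List.slice possible_three (some (i * 3)) (some (i + 3)))
    if !(PySem.Set.inter one two).isEmpty || !(PySem.Set.inter two three).isEmpty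
        || !(PySem.Set.inter three one).isEmpty then
      false
    else
      possiblesFitLoopA possible_one possible_two possible_three rest

def possibles_fit (possible_one : List Int) (possible_two : List Int) (possible_three : List Int) : Bool :=
  possiblesFitLoopA possible_one possible_two possible_three (PySem.List.pyRange 0 3 1)

-- ===== PORT B =====
-- loop body of Source B: concatenate dict.fromkeys of each slice, then test for a duplicate
def possiblesFitLoopB (possible_one : List Int) (possible_two : List Int) (possible_three : List Int) : List Int → Bool
  | [] => true
  | i :: rest =>
    let combined := [possible_one, possible_two, possible_three].foldl
      (fun acc grp => acc ++ PySem.List.dedup (PySem.List.slice grp (some (i * 3)) (some (i + 3)))) []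
    if (PySem.Set.ofList combined).length ≠ combined.length then
      false
    else
      possiblesFitLoopB possible_one possible_two possible_three rest

def possibles_fit_alt (possible_one : List Int) (possible_two : List Int) (possible_three : List Int) : Bool :=
  possiblesFitLoopB possible_one possible_two possible_three (PySem.List.pyRange 0 3 1)

-- ===== PRECONDITION & SPEC =====
def Spec_possibles_fit (possible_one : List Int) (possible_two : List Int) (possible_three : List Int) (out : Bool) : Prop := out = possibles_fit_alt possible_one possible_two possible_three
instance (possible_one : List Int) (possible_two : List Int) (possible_three : List Int) (out : Bool) : Decidable (Spec_possibles_fit possible_one possible_two possible_three out) := by unfold Spec_possibles_fit; infer_instance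

-- ===== CLAIM (what is proved, stated in full; the proofs are below) =====
def Claim_equal_possibles_fit : Prop := ∀ (possible_one : List Int) (possible_two : List Int) (possible_three : List Int), Dom_possibles_fit possible_one possible_two possible_three → Spec_possibles_fit possible_one possible_two possible_three (possibles_fit possible_one possible_two possible_three)

-- ===== LEMMAS AND PROOFS =====

-- set(xs) (as a foldl of Set.add) is a sublist of acc ++ xs
theorem pv_foldl_add_sublist {α : Type} [BEq α] (xs : List α) (acc : List α) :
    (xs.foldl PySem.Set.add acc).Sublist (acc ++ xs) := by
  induction xs generalizing acc with
  | nil => simp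
  | cons x xs ih =>
    simp only [List.foldl_cons]
    have h1 : (xs.foldl PySem.Set.add (PySem.Set.add acc x)).Sublist (PySem.Set.add acc x ++ xs) := ih _
    have h2 : (PySem.Set.add acc x ++ xs).Sublist (acc ++ x :: xs) := by
      unfold PySem.Set.add
      split
      · simpa using List.Sublist.append_left (List.sublist_cons_self x xs) acc
      · simp
    exact h1.trans h2

theorem pv_ofList_sublist {α : Type} [BEq α] (xs : List α) :
    (PySem.Set.ofList xs).Sublist xs := by
  have := pv_foldl_add_sublist xs ([] : List α)
  simpa [PySem.Set.ofList, PySem.Set.empty] using this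

-- on a duplicate-free list set(xs) is xs itself
theorem pv_foldl_add_of_nodup {α : Type} [BEq α] [LawfulBEq α] (xs : List α) (acc : List α)
    (h : (acc ++ xs).Nodup) : xs.foldl PySem.Set.add acc = acc ++ xs := by
  induction xs generalizing acc with
  | nil => simp
  | cons x xs ih =>
    have hx : x ∉ acc := by
      intro hmem
      have := List.disjoint_of_nodup_append h
      exact this hmem (by simp)
    have hadd : PySem.Set.add acc x = acc ++ [x] := by
      unfold PySem.Set.add
      simp [PySem.Set.contains, hx]
    simp only [List.foldl_cons, hadd]
    have h' : ((acc ++ [x]) ++ xs).Nodup := by simpa using h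
    simpa using ih (acc ++ [x]) h'

theorem pv_ofList_of_nodup {α : Type} [BEq α] [LawfulBEq α] (xs : List α) (h : xs.Nodup) :
    PySem.Set.ofList xs = xs := by
  have := pv_foldl_add_of_nodup xs ([] : List α) (by simpa using h)
  simpa [PySem.Set.ofList, PySem.Set.empty] using this

-- len(set(xs)) == len(xs) exactly when xs has no duplicate
theorem pv_ofList_length_iff {α : Type} [BEq α] [LawfulBEq α] (xs : List α) :
    (PySem.Set.ofList xs).length = xs.length ↔ xs.Nodup := by
  constructor
  · intro h
    have heq : PySem.Set.ofList xs = xs := (pv_ofList_sublist xs).eq_of_length h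
    have := PySem.List.nodup_dedup (α := α) xs
    rwa [PySem.List.dedup, heq] at this
  · intro h
    rw [pv_ofList_of_nodup xs h]

-- a nonempty intersection is exactly a failure of disjointness
theorem pv_inter_empty_iff {α : Type} [BEq α] [LawfulBEq α] (s t : List α) :
    (PySem.Set.inter s t).isEmpty = true ↔ s.Disjoint t := by
  unfold PySem.Set.inter
  rw [List.isEmpty_iff, List.filter_eq_nil_iff]
  constructor
  · intro h a ha hat
    have := h a ha
    simp [PySem.Set.contains] at this
    exact this hat
  · intro h a ha
    simp [PySem.Set.contains]
    exact h ha

-- per-round bodies agree: some pairwise intersection nonempty ⟺ the concatenation has a duplicate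
theorem pv_round_eq (s1 s2 s3 : List Int) (h1 : s1.Nodup) (h2 : s2.Nodup) (h3 : s3.Nodup) :
    (!(PySem.Set.inter s1 s2).isEmpty || !(PySem.Set.inter s2 s3).isEmpty
      || !(PySem.Set.inter s3 s1).isEmpty)
    = decide ((PySem.Set.ofList (s1 ++ s2 ++ s3)).length ≠ (s1 ++ s2 ++ s3).length) := by
  have hlen := pv_ofList_length_iff (s1 ++ s2 ++ s3)
  have hnodup_iff : (s1 ++ s2 ++ s3).Nodup ↔
      s1.Disjoint s2 ∧ s2.Disjoint s3 ∧ s3.Disjoint s1 := by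
    rw [List.append_assoc, List.nodup_append, List.nodup_append]
    constructor
    · rintro ⟨-, ⟨-, -, d23⟩, d1⟩
      refine ⟨fun {a} ha hb => ?_, fun {a} ha hb => d23 a ha a hb rfl,
        fun {a} ha hb => ?_⟩
      · exact d1 a ha a (List.mem_append_left _ hb) rfl
      · exact d1 a hb a (List.mem_append_right _ ha) rfl
    · rintro ⟨d12, d23, d31⟩
      refine ⟨h1, ⟨h2, h3, fun a ha b hb hab => d23 ha (hab ▸ hb)⟩, ?_⟩
      intro a ha b hb hab
      subst hab
      rcases List.mem_append.mp hb with hb | hb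
      · exact d12 ha hb
      · exact d31 hb ha
  by_cases hd : (s1 ++ s2 ++ s3).Nodup
  · obtain ⟨dd12, dd23, dd31⟩ := hnodup_iff.mp hd
    have e1 := (pv_inter_empty_iff s1 s2).mpr dd12
    have e2 := (pv_inter_empty_iff s2 s3).mpr dd23
    have e3 := (pv_inter_empty_iff s3 s1).mpr dd31
    rw [e1, e2, e3]
    simp only [Bool.not_true, Bool.or_self, Bool.false_or]
    rw [hlen.mpr hd]
    simp
  · have hne : (PySem.Set.ofList (s1 ++ s2 ++ s3)).length ≠ (s1 ++ s2 ++ s3).length :=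
      fun h => hd (hlen.mp h)
    have hnd : ¬(s1.Disjoint s2 ∧ s2.Disjoint s3 ∧ s3.Disjoint s1) :=
      fun h => hd (hnodup_iff.mpr h)
    have : (PySem.Set.inter s1 s2).isEmpty = false ∨ (PySem.Set.inter s2 s3).isEmpty = false
        ∨ (PySem.Set.inter s3 s1).isEmpty = false := by
      by_contra hall
      push_neg at hall
      obtain ⟨n1, n2, n3⟩ := hall
      exact hnd ⟨(pv_inter_empty_iff s1 s2).mp (by simpa using n1),
        (pv_inter_empty_iff s2 s3).mp (by simpa using n2),
        (pv_inter_empty_iff s3 s1).mp (by simpa using n3)⟩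
    have hright : decide ((PySem.Set.ofList (s1 ++ s2 ++ s3)).length
        ≠ (s1 ++ s2 ++ s3).length) = true := by simpa using hne
    rw [hright]
    rcases this with h | h | h <;> simp [h]

theorem pv_loop_eq (p1 p2 p3 : List Int) (idxs : List Int) :
    possiblesFitLoopA p1 p2 p3 idxs = possiblesFitLoopB p1 p2 p3 idxs := by
  induction idxs with
  | nil => rfl
  | cons i rest ih =>
    rw [possiblesFitLoopA, possiblesFitLoopB]
    simp only [List.foldl_cons, List.foldl_nil, List.nil_append, PySem.List.dedup]
    have n1 : (PySem.Set.ofList (PySem.List.slice p1 (some (i * 3)) (some (i + 3)))).Nodup := by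
      have := PySem.List.nodup_dedup (PySem.List.slice p1 (some (i * 3)) (some (i + 3))); simpa [PySem.List.dedup] using this
    have n2 : (PySem.Set.ofList (PySem.List.slice p2 (some (i * 3)) (some (i + 3)))).Nodup := by
      have := PySem.List.nodup_dedup (PySem.List.slice p2 (some (i * 3)) (some (i + 3))); simpa [PySem.List.dedup] using this
    have n3 : (PySem.Set.ofList (PySem.List.slice p3 (some (i * 3)) (some (i + 3)))).Nodup := by
      have := PySem.List.nodup_dedup (PySem.List.slice p3 (some (i * 3)) (some (i + 3))); simpa [PySem.List.dedup] using this
    have hr := pv_round_eq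
      (PySem.Set.ofList (PySem.List.slice p1 (some (i * 3)) (some (i + 3))))
      (PySem.Set.ofList (PySem.List.slice p2 (some (i * 3)) (some (i + 3))))
      (PySem.Set.ofList (PySem.List.slice p3 (some (i * 3)) (some (i + 3)))) n1 n2 n3
    rw [hr, ih]
    simp only [decide_eq_true_eq]
    split_ifs <;> rfl

-- ===== VERDICT (by name: the statement is the Claim_ definition above) =====
theorem possibles_fit_spec : Claim_equal_possibles_fit := by
  intro p1 p2 p3 _
  unfold Spec_possibles_fit possibles_fit possibles_fit_alt
  exact pv_loop_eq p1 p2 p3 _
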